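-- pv_equiv track=rewrite | github.com/lungnahahd/Python_Prac | Algorithm/CodingTest/2Test1.py | solution
-- ===== SOURCE A (Python) =====
-- def solution(goods):
--     answer = []
--     for i in range(len(goods)):
--         result = set()
--         temp = goods[0]
--         del goods[0]
--         notIn = True
--         wordCount = 0
--         while notIn:
--             for j in range(len(temp) - wordCount):
--                 val = temp[j:j+wordCount+1]
--                 nowIn = True
--                 for k in range(len(goods)):
--                     if val in goods[k]:
--                         nowIn = True
--                         break
--                     else:
--                         nowIn = False
--                 if not nowIn:
--                     result.add(val)
--                     notIn = False
--             wordCount += 1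
--             if wordCount > len(temp):
--                 result.add("None")
--                 notIn = False
--         semifinal = list(result)
--         final = sorted(semifinal)
--         last = ""
--         for m in final:
--             last = last + m + " "
--         answer.append(last[:-1])
--         goods.append(temp)
--     return answer
-- ===== SOURCE B (Python) =====
-- def solution(goods):
--     # one pass builds substring -> number-of-goods-containing-it; uniqueness is then a lookup
--     contain = {}
--     for g in goods:
--         seen = set()
--         for L in range(1, len(g) + 1):
--             for j in range(len(g) - L + 1):
--                 seen.add(g[j:j+L])
--         for s in seen:
--             contain[s] = contain.get(s, 0) + 1
--     answer = []
--     for g in goods: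
--         res = "None"
--         for L in range(1, len(g) + 1):
--             cand = sorted({g[j:j+L] for j in range(len(g) - L + 1)
--                            if contain[g[j:j+L]] == 1})
--             if cand:
--                 res = " ".join(cand)
--                 break
--         answer.append(res)
--     return answer
-- ===== Notes on version B (the rewrite author's own statement) =====
-- stated objective: faster
-- what changed: Instead of re-testing every substring of every good against all other goods, B makes one pass that hashes every good's distinct substrings into a substring->number-of-containing-goods table, so each uniqueness test becomes a single O(1) dictionary lookup instead of a scan over all other goods.
-- intended difference: On a singleton list whose only string is nonempty, A answers the placeholder word None (its nowIn flag is initialised True, so with no other goods every substring counts as seen elsewhere), while B answers the sorted distinct characters joined by spaces - the intended value, since with no other goods every substring is vacuously unique. — e.g. on solution(["ab"]): A returns (["None"]), B returns (["a b"])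
import Mathlib
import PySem

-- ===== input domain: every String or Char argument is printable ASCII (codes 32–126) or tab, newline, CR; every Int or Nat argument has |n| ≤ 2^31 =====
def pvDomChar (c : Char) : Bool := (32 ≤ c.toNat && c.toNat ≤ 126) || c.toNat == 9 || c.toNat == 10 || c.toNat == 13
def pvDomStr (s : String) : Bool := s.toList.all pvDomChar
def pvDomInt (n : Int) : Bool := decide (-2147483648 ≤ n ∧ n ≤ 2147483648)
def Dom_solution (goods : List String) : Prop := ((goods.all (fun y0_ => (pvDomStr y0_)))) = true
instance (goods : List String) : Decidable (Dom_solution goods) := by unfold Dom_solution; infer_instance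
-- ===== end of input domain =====

-- B replaces A's per-good rescan of all the other goods with one precomputed
-- substring -> number-of-containing-goods table, so each uniqueness test is a lookup (objective: faster).
-- A rotates its argument list in place while running but restores it before returning;
-- the equivalence proved here is about the return value.

-- shared Python primitives: len(s) as a Nat, and the slice s[j:j+L]
def pyLen (s : String) : Nat := s.toList.length
def pySub (s : String) (j L : Nat) : String :=
  PySem.Str.slice s (some (j : Int)) (some ((j : Int) + (L : Int)))

-- ===== PORT A =====
-- the 'for k in range(len(goods))' loop computing nowIn, with its break
def solNowIn (val : String) : List String → Bool → Bool
  | [], acc => acc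
  | g :: rest, _ => if PySem.Str.isIn val g then true else solNowIn val rest false

-- body of 'for j in range(len(temp) - wordCount)'; state = (result, notIn)
def solJStep (temp : String) (others : List String) (wc : Nat)
    (st : PySem.Set String × Bool) (j : Nat) : PySem.Set String × Bool :=
  let val := pySub temp j (wc + 1)
  if solNowIn val others true then st else (PySem.Set.add st.1 val, false)

-- 'while notIn': j-loop, wordCount += 1, the 'wordCount > len(temp)' check, loop test.
-- fuel ≥ len(temp)+1-wc only makes the recursion structural; the loop always exits on its own test.
def solWhileF (temp : String) (others : List String) :
    Nat → Nat → PySem.Set String → PySem.Set String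
  | 0, _, result => result  -- never reached when called with enough fuel
  | fuel + 1, wc, result =>
    let st := (List.range (pyLen temp - wc)).foldl (solJStep temp others wc) (result, true)
    if wc + 1 > pyLen temp then PySem.Set.add st.1 "None"
    else if st.2 then solWhileF temp others fuel (wc + 1) st.1 else st.1

-- one iteration of the outer loop: the while loop, sorted(list(result)), the join-by-fold, last[:-1]
def solEntry (temp : String) (others : List String) : String :=
  let result := solWhileF temp others (pyLen temp + 1) 0 PySem.Set.empty
  let final := PySem.List.sorted result (fun x => x.toList) false  -- sorted(...): str order = order of .toList
  let last := final.foldl (fun l m => l ++ m ++ " ") ""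
  PySem.Str.slice last none (some (-1))

-- 'for i in range(len(goods))' over the state (answer, goods); del goods[0] / goods.append(temp)
def solOuter : Nat → List String × List String → List String × List String
  | 0, st => st
  | n + 1, (answer, gs) =>
    match gs with
    | [] => (answer, gs)  -- Python's goods[0] would raise here; unreachable: the list keeps its length
    | temp :: rest => solOuter n (answer ++ [solEntry temp rest], rest ++ [temp])

def solution (goods : List String) : List String :=
  (solOuter goods.length ([], goods)).1

-- ===== PORT B =====
-- seen = all distinct substrings of g (the two nested set-building loops)
def altSeen (g : String) : PySem.Set String :=
  (List.range' 1 (pyLen g)).foldl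
    (fun s L => (List.range (pyLen g - L + 1)).foldl (fun s j => PySem.Set.add s (pySub g j L)) s)
    PySem.Set.empty

-- contain[s] = number of goods having s as a substring
def altContain (goods : List String) : PySem.Dict String Int :=
  goods.foldl (fun d g => (altSeen g).foldl (fun d s => d.insert s (d.getD s 0 + 1)) d)
    PySem.Dict.empty

-- cand = sorted({g[j:j+L] ... if contain[g[j:j+L]] == 1}); getD is exact: the key is always present
def altCand (contain : PySem.Dict String Int) (g : String) (L : Nat) : List String :=
  PySem.List.sorted
    (PySem.Set.ofList (((List.range (pyLen g - L + 1)).map (fun j => pySub g j L)).filter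
      (fun s => contain.getD s 0 == 1)))
    (fun x => x.toList) false  -- sorted(...): str order = order of .toList

-- the 'for L in range(1, len(g)+1)' loop with its break; falls through to "None"
def altFind (contain : PySem.Dict String Int) (g : String) : List Nat → String
  | [] => "None"
  | L :: rest =>
    let cand := altCand contain g L
    if cand.isEmpty then altFind contain g rest else PySem.Str.join " " cand

def solution_alt (goods : List String) : List String :=
  let contain := altContain goods
  goods.map (fun g => altFind contain g (List.range' 1 (pyLen g)))

-- ===== PRECONDITION & SPEC =====
-- On a singleton list whose only string is nonempty A answers the placeholder word None (its nowIn
-- flag starts True, so with no other goods every substring counts as seen elsewhere); B answers the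
-- sorted distinct characters joined by spaces, the intended value: with no other goods every
-- substring is vacuously unique.
def D_solution (goods : List String) : Prop := goods.length = 1 ∧ goods ≠ [""]
instance (goods : List String) : Decidable (D_solution goods) := by unfold D_solution; infer_instance

def Spec_solution (goods : List String) (out : List String) : Prop :=
  ¬ D_solution goods → out = solution_alt goods
instance (goods : List String) (out : List String) : Decidable (Spec_solution goods out) := by
  unfold Spec_solution; infer_instance

def pvDiffWitness_solution : List String := (["ab"])
def pvDiffWitnessOut_solution : (List String) × (List String) := ((["None"]), (["a b"]))

-- ===== CLAIM (what is proved, stated in full; the proofs are below) =====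
def Claim_unchanged_solution : Prop :=
  ∀ (goods : List String), Dom_solution goods → Spec_solution goods (solution goods)
def Claim_changed_solution : Prop :=
  Dom_solution (pvDiffWitness_solution) ∧ D_solution (pvDiffWitness_solution) ∧
  solution (pvDiffWitness_solution) = pvDiffWitnessOut_solution.1 ∧
  solution_alt (pvDiffWitness_solution) = pvDiffWitnessOut_solution.2 ∧
  pvDiffWitnessOut_solution.1 ≠ pvDiffWitnessOut_solution.2
def Claim_exact_solution : Prop :=
  ∀ (goods : List String), Dom_solution goods → D_solution goods →
    solution goods ≠ solution_alt goods

-- ===== LEMMAS AND PROOFS =====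

-- the substring list Python enumerates at length L
def candList (g : String) (L : Nat) : List String :=
  (List.range (pyLen g - L + 1)).map (fun j => pySub g j L)

-- A's uniqueness test on a candidate, as a predicate
def predA (os : List String) (v : String) : Bool := !solNowIn v os true

lemma solNowIn_false (val : String) :
    ∀ l : List String, solNowIn val l false = l.any (fun g => PySem.Str.isIn val g) := by
  intro l; induction l with
  | nil => rfl
  | cons g rest ih =>
    simp only [solNowIn, List.any_cons]
    by_cases h : PySem.Str.isIn val g = true <;> simp [ih]

lemma solNowIn_any (val g : String) (rest : List String) (b : Bool) :
    solNowIn val (g :: rest) b = (g :: rest).any (fun x => PySem.Str.isIn val x) := by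
  simp only [solNowIn, List.any_cons]
  by_cases h : PySem.Str.isIn val g = true <;> simp [solNowIn_false]

lemma pySub_toList (g : String) (j L : Nat) :
    (pySub g j L).toList = (g.toList.drop j).take L := by
  have hc : ((j : Int) + (L : Int)) = ((j + L : Nat) : Int) := by push_cast; ring
  rw [pySub, PySem.Str.toList_slice]
  simp only [PySem.Chars.slice_eq_listSlice]
  rw [hc, PySem.List.slice_natCast]
  congr 1
  omega

lemma pySub_len (g : String) (j L : Nat) (hL : L ≤ pyLen g) (hj : j < pyLen g - L + 1) :
    (pySub g j L).toList.length = L := by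
  rw [pySub_toList]
  simp only [List.length_take, List.length_drop]
  unfold pyLen at hL hj; omega

lemma pySub_isIn (g : String) (j L : Nat) :
    PySem.Str.isIn (pySub g j L) g = true := by
  rw [PySem.Str.isIn_eq]
  refine (PySem.Chars.exists_prefix_drop_iff_isIn _ _).mp ⟨j, ?_⟩
  rw [pySub_toList]
  exact List.take_prefix _ _

lemma mem_candList (g v : String) (L : Nat) :
    v ∈ candList g L ↔ ∃ j, j < pyLen g - L + 1 ∧ v = pySub g j L := by
  simp only [candList, List.mem_map, List.mem_range]
  constructor
  · rintro ⟨j, hj, rfl⟩; exact ⟨j, hj, rfl⟩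
  · rintro ⟨j, hj, rfl⟩; exact ⟨j, hj, rfl⟩

lemma isIn_exists_candList (g v : String) (hv : v.toList ≠ [])
    (h : PySem.Str.isIn v g = true) :
    ∃ L, 1 ≤ L ∧ L ≤ pyLen g ∧ v ∈ candList g L := by
  rw [PySem.Str.isIn_eq] at h
  obtain ⟨j, hpre⟩ := (PySem.Chars.exists_prefix_drop_iff_isIn _ _).mpr h
  have hlen : v.toList.length ≤ g.toList.length - j := by
    have := hpre.length_le; simpa using this
  have hne : 1 ≤ v.toList.length := by
    cases hl : v.toList with
    | nil => exact absurd hl hv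
    | cons a t => simp
  have hj' : j ≤ g.toList.length - v.toList.length := by omega
  refine ⟨v.toList.length, hne, by unfold pyLen; omega, ?_⟩
  rw [mem_candList]
  refine ⟨j, by unfold pyLen; omega, ?_⟩
  apply String.toList_inj.mp
  rw [pySub_toList]
  exact List.prefix_iff_eq_take.mp hpre

-- altSeen is set(all substrings), via ofList of the flattened candidate lists
lemma foldl_set_update {α : Type} [BEq α] (m : Nat → List α) :
    ∀ (l : List Nat) (s : PySem.Set α),
      l.foldl (fun s L => PySem.Set.update s (m L)) s = PySem.Set.update s (l.flatMap m) := by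
  intro l; induction l with
  | nil => intro s; rfl
  | cons a t ih =>
    intro s
    simp only [List.foldl_cons, List.flatMap_cons, ih]
    show PySem.Set.update _ _ = List.foldl PySem.Set.add s (m a ++ t.flatMap m)
    rw [List.foldl_append]; rfl

lemma altSeen_eq_ofList (g : String) :
    altSeen g = PySem.Set.ofList ((List.range' 1 (pyLen g)).flatMap (candList g)) := by
  unfold altSeen
  have hinner : ∀ (L : Nat) (s : PySem.Set String),
      (List.range (pyLen g - L + 1)).foldl (fun s j => PySem.Set.add s (pySub g j L)) s
        = PySem.Set.update s (candList g L) := by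
    intro L s
    show _ = List.foldl PySem.Set.add s ((List.range (pyLen g - L + 1)).map (fun j => pySub g j L))
    rw [List.foldl_map]
  calc (List.range' 1 (pyLen g)).foldl
        (fun s L => (List.range (pyLen g - L + 1)).foldl (fun s j => PySem.Set.add s (pySub g j L)) s)
        PySem.Set.empty
      = (List.range' 1 (pyLen g)).foldl (fun s L => PySem.Set.update s (candList g L))
          PySem.Set.empty := by
        congr 1; funext s L; exact hinner L s
    _ = PySem.Set.update PySem.Set.empty ((List.range' 1 (pyLen g)).flatMap (candList g)) :=
        foldl_set_update _ _ _
    _ = _ := by rw [PySem.Set.ofList_eq_foldl]; rfl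

lemma nodup_altSeen (g : String) : (altSeen g).Nodup := by
  rw [altSeen_eq_ofList]; exact PySem.Set.nodup_ofList _

lemma mem_altSeen (g v : String) (hv : v.toList ≠ []) :
    v ∈ altSeen g ↔ PySem.Str.isIn v g = true := by
  rw [altSeen_eq_ofList, PySem.Set.mem_ofList, List.mem_flatMap]
  constructor
  · rintro ⟨L, hL, hmem⟩
    rw [List.mem_range'_1] at hL
    obtain ⟨j, hj, rfl⟩ := (mem_candList g v L).mp hmem
    exact pySub_isIn g j L
  · intro h
    obtain ⟨L, h1, h2, hmem⟩ := isIn_exists_candList g v hv h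
    exact ⟨L, List.mem_range'_1.mpr ⟨h1, by omega⟩, hmem⟩

lemma contain_getD_aux (v : String) (hv : v.toList ≠ []) :
    ∀ (G : List String) (d : PySem.Dict String Int),
      (G.foldl (fun d g => (altSeen g).foldl (fun d s => d.insert s (d.getD s 0 + 1)) d) d).getD v 0
        = d.getD v 0 + (G.countP (fun g => PySem.Str.isIn v g) : Int) := by
  intro G; induction G with
  | nil => intro d; simp
  | cons g G ih =>
    intro d
    simp only [List.foldl_cons, ih, PySem.Dict.getD_foldl_insert_add_one, List.countP_cons]
    have hcount : (altSeen g).count v = if PySem.Str.isIn v g = true then 1 else 0 := by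
      by_cases h : PySem.Str.isIn v g = true
      · rw [if_pos h]
        exact List.count_eq_one_of_mem (nodup_altSeen g) ((mem_altSeen g v hv).mpr h)
      · rw [if_neg h]
        rw [List.count_eq_zero]
        intro hmem; exact h ((mem_altSeen g v hv).mp hmem)
    rw [hcount]
    by_cases h : PySem.Str.isIn v g = true
    · simp only [h, if_true]
      push_cast
      ring
    · simp only [h]
      push_cast
      ring

lemma contain_getD (G : List String) (v : String) (hv : v.toList ≠ []) :
    (altContain G).getD v 0 = (G.countP (fun g => PySem.Str.isIn v g) : Int) := by
  unfold altContain
  rw [contain_getD_aux v hv G PySem.Dict.empty]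
  simp [pysem]

-- A's uniqueness test agrees with B's count-lookup test on every enumerated candidate
lemma pred_eq (G : List String) (t : String) (os : List String) (hos : os ≠ [])
    (hperm : (t :: os).Perm G) (L : Nat) (h1 : 1 ≤ L) (hL : L ≤ pyLen t)
    (v : String) (hv : v ∈ candList t L) :
    predA os v = ((altContain G).getD v 0 == 1) := by
  obtain ⟨j, hj, rfl⟩ := (mem_candList t v L).mp hv
  have hvlen : (pySub t j L).toList.length = L := pySub_len t j L hL hj
  have hvne : (pySub t j L).toList ≠ [] := by
    intro h; rw [h] at hvlen; simp at hvlen; omega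
  have hgetD := contain_getD G (pySub t j L) hvne
  have hcnt : (G.countP (fun g => PySem.Str.isIn (pySub t j L) g))
      = ((t :: os).countP (fun g => PySem.Str.isIn (pySub t j L) g)) :=
    (List.Perm.countP_eq _ hperm).symm
  rw [List.countP_cons, if_pos (pySub_isIn t j L)] at hcnt
  obtain ⟨g0, os', rfl⟩ : ∃ g0 os', os = g0 :: os' := by
    cases os with
    | nil => exact absurd rfl hos
    | cons a b => exact ⟨a, b, rfl⟩
  rw [predA, solNowIn_any, hgetD, hcnt]
  by_cases hany : (g0 :: os').any (fun x => PySem.Str.isIn (pySub t j L) x) = true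
  · obtain ⟨a, ha, hpa⟩ := List.any_eq_true.mp hany
    have hpos : 0 < (g0 :: os').countP (fun g => PySem.Str.isIn (pySub t j L) g) :=
      List.countP_pos_iff.mpr ⟨a, ha, hpa⟩
    simp only [hany, Bool.not_true]
    symm
    rw [beq_eq_false_iff_ne]
    intro hc
    push_cast at hc
    omega
  · have hz : (g0 :: os').countP (fun g => PySem.Str.isIn (pySub t j L) g) = 0 := by
      rw [List.countP_eq_zero]
      intro a ha hpa
      exact hany (List.any_eq_true.mpr ⟨a, ha, hpa⟩)
    simp only [hany, Bool.not_false, hz]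
    symm
    rw [beq_iff_eq]
    norm_num

-- the j-loop is a filtered collect over the candidate list
lemma jfold (t : String) (os : List String) (wc : Nat) :
    ∀ (n : Nat) (r : PySem.Set String) (b : Bool),
      (List.range n).foldl (solJStep t os wc) (r, b)
        = (PySem.Set.update r (((List.range n).map (fun j => pySub t j (wc + 1))).filter (predA os)),
           b && (((List.range n).map (fun j => pySub t j (wc + 1))).filter (predA os)).isEmpty) := by
  intro n; induction n with
  | zero => intro r b; simp [PySem.Set.update]
  | succ n ih =>
    intro r b
    rw [List.range_succ, List.foldl_append, List.map_append, List.filter_append, ih]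
    simp only [List.foldl_cons, List.foldl_nil, List.map_cons, List.map_nil]
    rw [solJStep]
    by_cases h : solNowIn (pySub t n (wc + 1)) os true = true
    · have hp : predA os (pySub t n (wc + 1)) = false := by simp [predA, h]
      simp [h, hp, PySem.Set.update]
    · have hp : predA os (pySub t n (wc + 1)) = true := by simp [predA, h]
      simp only [h, hp, List.filter_cons_of_pos, List.filter_nil]
      refine Prod.ext ?_ ?_
      · show PySem.Set.add (PySem.Set.update r _) _ = PySem.Set.update r _
        show PySem.Set.add (List.foldl PySem.Set.add r _) _ = List.foldl PySem.Set.add r _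
        rw [List.foldl_append]
        rfl
      · simp

-- rendering: fold-concat with trailing space, then [:-1], is " ".join
lemma flatten_dropLast : ∀ (ls : List (List Char)),
    (ls.map (fun m => m ++ [' '])).flatten.dropLast = PySem.Chars.join [' '] ls := by
  intro ls
  induction ls with
  | nil => simp [PySem.Chars.join_nil]
  | cons x t ih =>
    cases t with
    | nil => simp [PySem.Chars.join_singleton]
    | cons y t' =>
      rw [PySem.Chars.join_cons_cons]
      simp only [List.map_cons, List.flatten_cons] at ih ⊢
      have hne : y ++ [' '] ++ (List.map (fun m => m ++ [' ']) t').flatten ≠ [] := by simp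
      rw [List.dropLast_append_of_ne_nil hne, ih]

lemma foldl_concat_toList : ∀ (l : List String) (a : String),
    (l.foldl (fun x m => x ++ m ++ " ") a).toList
      = a.toList ++ ((l.map String.toList).map (fun m => m ++ [' '])).flatten := by
  intro l; induction l with
  | nil => intro a; simp
  | cons x t ih =>
    intro a
    simp only [List.foldl_cons, ih, List.map_cons, List.flatten_cons]
    rw [String.toList_append, String.toList_append]
    simp

lemma render_eq (l : List String) :
    PySem.Str.slice (l.foldl (fun x m => x ++ m ++ " ") "") none (some (-1))
      = PySem.Str.join " " l := by
  apply String.toList_inj.mp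
  rw [PySem.Str.slice_to_neg_one, PySem.Str.toList_join, foldl_concat_toList]
  have : ("" : String).toList = [] := rfl
  rw [this, List.nil_append]
  have : (" " : String).toList = [' '] := rfl
  rw [this]
  exact flatten_dropLast _

-- the while loop, rendered, equals B's length-ascending search
lemma while_eq (t : String) (os : List String) (C : PySem.Dict String Int)
    (hpred : ∀ L, 1 ≤ L → L ≤ pyLen t → ∀ v ∈ candList t L, predA os v = (C.getD v 0 == 1)) :
    ∀ (fuel wc : Nat), pyLen t - wc < fuel →
      PySem.Str.join " "
          (PySem.List.sorted (solWhileF t os fuel wc PySem.Set.empty) (fun x => x.toList) false)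
        = altFind C t (List.range' (wc + 1) (pyLen t - wc)) := by
  intro fuel
  induction fuel with
  | zero => intro wc h; omega
  | succ fuel ih =>
    intro wc hfuel
    rw [solWhileF]
    by_cases hend : wc + 1 > pyLen t
    · have h0 : pyLen t - wc = 0 := by omega
      rw [if_pos hend, h0]
      simp only [List.range'_zero, List.range_zero, List.foldl_nil]
      have hNone : altFind C t [] = "None" := rfl
      rw [hNone]
      show PySem.Str.join " " (PySem.List.sorted (PySem.Set.add PySem.Set.empty "None")
        (fun x => x.toList) false) = "None"
      decide
    · rw [if_neg hend]
      have hwc : wc + 1 ≤ pyLen t := by omega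
      rw [jfold]
      have hcl : (List.range (pyLen t - wc)).map (fun j => pySub t j (wc + 1))
          = candList t (wc + 1) := by
        unfold candList
        congr 2
        omega
      rw [hcl]
      have hfilter : (candList t (wc + 1)).filter (predA os)
          = (candList t (wc + 1)).filter (fun s => C.getD s 0 == 1) :=
        List.filter_congr (fun v hv => hpred (wc + 1) (by omega) hwc v hv)
      have hrange : List.range' (wc + 1) (pyLen t - wc)
          = (wc + 1) :: List.range' (wc + 2) (pyLen t - (wc + 1)) := by
        have h1 : pyLen t - wc = (pyLen t - (wc + 1)) + 1 := by omega
        rw [h1, List.range'_succ]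
      rw [hrange, altFind]
      have hcand : altCand C t (wc + 1)
          = PySem.List.sorted
              (PySem.Set.ofList ((candList t (wc + 1)).filter (fun s => C.getD s 0 == 1)))
              (fun x => x.toList) false := by
        unfold altCand candList
        rfl
      by_cases hF : (candList t (wc + 1)).filter (fun s => C.getD s 0 == 1) = []
      · -- nothing unique at this length: both sides move on
        have hFA : (candList t (wc + 1)).filter (predA os) = [] := by rw [hfilter, hF]
        simp only [hFA, List.isEmpty_nil, Bool.and_true, if_true]
        have hcand0 : (altCand C t (wc + 1)).isEmpty = true := by
          rw [hcand, hF]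
          decide
        rw [hcand0, if_pos rfl]
        show PySem.Str.join " " (PySem.List.sorted
            (solWhileF t os fuel (wc + 1) (PySem.Set.update PySem.Set.empty [])) (fun x => x.toList) false)
          = altFind C t (List.range' (wc + 2) (pyLen t - (wc + 1)))
        exact ih (wc + 1) (by omega)
      · -- found the minimal length: both sides return the sorted unique substrings
        have hFA : (candList t (wc + 1)).filter (predA os) ≠ [] := by rw [hfilter]; exact hF
        have hne : ((candList t (wc + 1)).filter (predA os)).isEmpty = false := by
          rw [List.isEmpty_eq_false_iff]; exact hFA
        simp only [hne, Bool.and_false]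
        have hofne : PySem.Set.ofList ((candList t (wc + 1)).filter (fun s => C.getD s 0 == 1))
            ≠ [] := by
          intro hempty
          obtain ⟨x, xs, hx⟩ : ∃ x xs, (candList t (wc + 1)).filter (fun s => C.getD s 0 == 1)
              = x :: xs := by
            cases hc : (candList t (wc + 1)).filter (fun s => C.getD s 0 == 1) with
            | nil => exact absurd hc hF
            | cons a b => exact ⟨a, b, rfl⟩
          have : x ∈ PySem.Set.ofList ((candList t (wc + 1)).filter (fun s => C.getD s 0 == 1)) :=
            (PySem.Set.mem_ofList _ _).mpr (by rw [hx]; exact List.mem_cons_self)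
          rw [hempty] at this
          exact absurd this (List.not_mem_nil)
        have hcandne : (altCand C t (wc + 1)).isEmpty = false := by
          rw [List.isEmpty_eq_false_iff, hcand]
          intro hs
          exact hofne ((PySem.List.sorted_eq_nil_iff _ _ _).mp hs)
        rw [hcandne, if_neg (by simp)]
        rw [hcand, hfilter]
        rfl

lemma solEntry_eq (t : String) (os : List String) :
    solEntry t os = PySem.Str.join " "
      (PySem.List.sorted (solWhileF t os (pyLen t + 1) 0 PySem.Set.empty) (fun x => x.toList) false) := by
  unfold solEntry
  exact render_eq _

lemma entry_eq (G : List String) (t : String) (os : List String) (hos : os ≠ [])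
    (hperm : (t :: os).Perm G) :
    solEntry t os = altFind (altContain G) t (List.range' 1 (pyLen t)) := by
  rw [solEntry_eq]
  have := while_eq t os (altContain G)
    (fun L h1 hL v hv => pred_eq G t os hos hperm L h1 hL v hv)
    (pyLen t + 1) 0 (by omega)
  simpa using this

lemma outer_eq (G : List String) (hG : G.length ≠ 1) :
    ∀ (n : Nat) (ans gs : List String), gs.Perm G → n ≤ gs.length →
      (solOuter n (ans, gs)).1
        = ans ++ (gs.take n).map (fun g => altFind (altContain G) g (List.range' 1 (pyLen g))) := by
  intro n
  induction n with
  | zero => intro ans gs _ _; simp [solOuter]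
  | succ n ih =>
    intro ans gs hperm hlen
    cases gs with
    | nil => simp at hlen
    | cons t rest =>
      have hrest : rest ≠ [] := by
        intro h
        subst h
        have := hperm.length_eq
        simp at this
        omega
      rw [solOuter]
      rw [ih (ans ++ [solEntry t rest]) (rest ++ [t])
          ((List.perm_append_singleton t rest).trans hperm)
          (by simp at hlen ⊢; omega)]
      rw [List.take_append_of_le_length (by simp at hlen; omega)]
      rw [entry_eq G t rest hrest hperm]
      simp [List.take_succ_cons]

-- B matched on A's singleton quirk input [""]
lemma singleton_empty_eq : solution [""] = solution_alt [""] := by decide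

theorem solution_spec : Claim_unchanged_solution := by
  intro goods _ hnD
  by_cases h1 : goods.length = 1
  · obtain ⟨s, rfl⟩ := List.length_eq_one_iff.mp h1
    have hs : s = "" := by
      by_contra hne
      exact hnD ⟨by simp, by simp [hne]⟩
    subst hs
    exact singleton_empty_eq
  · show solution goods = solution_alt goods
    rw [solution, outer_eq goods h1 goods.length [] goods (List.Perm.refl _) (le_refl _)]
    rw [List.take_length]
    rfl

theorem solution_changed : Claim_changed_solution := by
  unfold Claim_changed_solution; decide

-- ===== tight claim: on every singleton [t], t ≠ "", the two results really differ =====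

lemma solWhileF_none (t : String) :
    ∀ (fuel wc : Nat), pyLen t - wc < fuel →
      solWhileF t [] fuel wc PySem.Set.empty = ["None"] := by
  intro fuel
  induction fuel with
  | zero => intro wc h; omega
  | succ fuel ih =>
    intro wc hfuel
    rw [solWhileF, jfold]
    have hfilt : ∀ (l : List String), l.filter (predA []) = [] := by
      intro l
      apply List.filter_eq_nil_iff.mpr
      intro v _
      simp [predA, solNowIn]
    rw [hfilt]
    by_cases hend : wc + 1 > pyLen t
    · rw [if_pos hend]; rfl
    · rw [if_neg hend]
      simp only [List.isEmpty_nil, Bool.and_true, if_true]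
      exact ih (wc + 1) (by omega)

lemma solution_singleton_A (t : String) : solution [t] = [solEntry t []] := by
  rfl

lemma entry_none (t : String) : solEntry t [] = "None" := by
  rw [solEntry_eq, solWhileF_none t (pyLen t + 1) 0 (by omega)]
  decide

lemma join_ones_length : ∀ (ls : List (List Char)),
    (∀ x ∈ ls, x.length = 1) → (PySem.Chars.join [' '] ls).length = 2 * ls.length - 1 := by
  intro ls
  induction ls with
  | nil => intro _; simp [PySem.Chars.join_nil]
  | cons x t ih =>
    intro h
    cases t with
    | nil =>
      rw [PySem.Chars.join_singleton]
      have := h x (by simp)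
      simp [this]
    | cons y t' =>
      rw [PySem.Chars.join_cons_cons]
      have hx := h x (by simp)
      have hrest := ih (fun z hz => h z (by simp [hz]))
      simp only [List.length_append, List.length_cons, List.length_nil] at hrest ⊢
      omega

theorem solution_tight : Claim_exact_solution := by
  intro goods _ hD
  obtain ⟨hlen, hne⟩ := hD
  obtain ⟨t, rfl⟩ := List.length_eq_one_iff.mp hlen
  have htne : t ≠ "" := fun h => hne (by rw [h])
  have htl : t.toList ≠ [] := fun h => htne (String.toList_inj.mp h)
  have hplen : 1 ≤ pyLen t := by
    unfold pyLen
    cases hl : t.toList with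
    | nil => exact absurd hl htl
    | cons a b => simp
  rw [solution_singleton_A, entry_none]
  -- B's side: the first length-1 pass finds every character unique
  show ¬ (["None"] = solution_alt [t])
  have hC : ∀ v ∈ candList t 1, (altContain [t]).getD v 0 == 1 := by
    intro v hv
    obtain ⟨j, hj, rfl⟩ := (mem_candList t v 1).mp hv
    have hvlen : (pySub t j 1).toList.length = 1 := pySub_len t j 1 hplen hj
    have hvne : (pySub t j 1).toList ≠ [] := by
      intro h; rw [h] at hvlen; simp at hvlen
    rw [contain_getD [t] _ hvne]
    rw [List.countP_cons, List.countP_nil, if_pos (pySub_isIn t j 1)]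
    decide
  have hfilt : (candList t 1).filter (fun s => (altContain [t]).getD s 0 == 1) = candList t 1 :=
    List.filter_eq_self.mpr hC
  have hclne : candList t 1 ≠ [] := by
    unfold candList
    have : pyLen t - 1 + 1 = pyLen t := by omega
    rw [this]
    intro h
    rw [List.map_eq_nil_iff, List.range_eq_nil] at h
    omega
  have hrange : List.range' 1 (pyLen t) = 1 :: List.range' 2 (pyLen t - 1) := by
    have h1 : pyLen t = (pyLen t - 1) + 1 := by omega
    rw [h1, List.range'_succ]
    congr 1
  have hofne : PySem.Set.ofList (candList t 1) ≠ [] := by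
    intro hempty
    obtain ⟨x, xs, hx⟩ : ∃ x xs, candList t 1 = x :: xs := by
      cases hc : candList t 1 with
      | nil => exact absurd hc hclne
      | cons a b => exact ⟨a, b, rfl⟩
    have : x ∈ PySem.Set.ofList (candList t 1) :=
      (PySem.Set.mem_ofList _ _).mpr (by rw [hx]; exact List.mem_cons_self)
    rw [hempty] at this
    exact absurd this (List.not_mem_nil)
  have hcand : altCand (altContain [t]) t 1
      = PySem.List.sorted (PySem.Set.ofList (candList t 1)) (fun x => x.toList) false := by
    unfold altCand
    show PySem.List.sorted (PySem.Set.ofList ((candList t 1).filter _)) _ _ = _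
    rw [hfilt]
  have hcandne : (altCand (altContain [t]) t 1).isEmpty = false := by
    rw [List.isEmpty_eq_false_iff, hcand]
    intro hs
    exact hofne ((PySem.List.sorted_eq_nil_iff _ _ _).mp hs)
  have halt : solution_alt [t]
      = [PySem.Str.join " " (altCand (altContain [t]) t 1)] := by
    show [altFind (altContain [t]) t (List.range' 1 (pyLen t))] = _
    rw [hrange, altFind, hcandne]
    simp
  rw [halt]
  intro heq
  have hjoin : "None" = PySem.Str.join " " (altCand (altContain [t]) t 1) := by
    injection heq
  -- every element of the candidate list is a single character; the join has odd length; 4 is even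
  have hones : ∀ x ∈ altCand (altContain [t]) t 1, x.toList.length = 1 := by
    intro x hx
    rw [hcand, PySem.List.mem_sorted, PySem.Set.mem_ofList] at hx
    obtain ⟨j, hj, rfl⟩ := (mem_candList t x 1).mp hx
    exact pySub_len t j 1 hplen hj
  have hlen4 : ("None" : String).toList.length = 4 := by decide
  have := congrArg (fun s : String => s.toList.length) hjoin
  simp only [hlen4, PySem.Str.toList_join] at this
  have hj1 : ∀ x ∈ (altCand (altContain [t]) t 1).map String.toList, x.length = 1 := by
    intro x hx
    rw [List.mem_map] at hx
    obtain ⟨y, hy, rfl⟩ := hx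
    exact hones y hy
  have hodd := join_ones_length _ hj1
  have hne0 : (altCand (altContain [t]) t 1).length ≥ 1 := by
    cases hc : altCand (altContain [t]) t 1 with
    | nil => rw [hc] at hcandne; simp at hcandne
    | cons a b => simp
  have hsep : (" " : String).toList = [' '] := rfl
  rw [hsep] at this
  rw [hodd, List.length_map] at this
  omega
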